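-- pv_equiv track=rewrite | github.com/MohsenBakrThiqah/AI_Performance_web | utils/report_utils.py | generate_custom_html
-- ===== SOURCE A (Python) =====
-- def generate_custom_html(form_data):
--     """Generate the custom HTML table with test details"""
--     return f'''
--         <p class="dashboard-title">Test Report Detailed Results</p>
--         </div>
--         <div class="panel-body">
--             <section id="apdex" class="col-md-12 table-responsive">
--                 <table id="apdexTable" class="table table-bordered table-condensed tablesorter ">
--                     <tr>
--                         <td>Performance Engineer Name</td>
--                         <td>{form_data.get('engineer_name', '')}</td>
--                     </tr>
--                     <tr>
--                         <td>URL Under Test</td>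
--                         <td>{form_data.get('url', '')}</td>
--                     </tr>
--                     <tr>
--                         <td>Test Round</td>
--                         <td>{form_data.get('test_round', '')}</td>
--                     </tr>
--                     <tr>
--                         <td>Test Round Results</td>
--                         <td>{form_data.get('round_status', '')}</td>
--                     </tr>
--                     <tr>
--                         <td>Test Type</td>
--                         <td>{form_data.get('test_type', '')}</td>
--                     </tr>
--                     <tr>
--                         <td>Number of CUs</td>
--                         <td>{form_data.get('cu', '')}</td>
--                     </tr>
--                     <tr>
--                         <td>Ramp up in min</td>
--                         <td>{form_data.get('ramp_up', '')}</td>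
--                     </tr>
--                     <tr>
--                         <td>Test Duration in min</td>
--                         <td>{form_data.get('duration', '')}</td>
--                     </tr>
--                     <tr>
--                         <td>Web Transactions Compliant?</td>
--                         <td>{form_data.get('web_trans_status', '')}</td>
--                     </tr>
--                     <tr>
--                         <td>API Transactions Compliant?</td>
--                         <td>{form_data.get('api_trans_status', '')}</td>
--                     </tr>
--                     <tr>
--                         <td>Error % Compliant?</td>
--                         <td>{form_data.get('error_rate_status', '')}</td>
--                     </tr>
--                     <tr>
--                         <td>API 90% Threshold (ms)</td>
--                         <td>{form_data.get('api_threshold', '')}</td>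
--                     </tr>
--                     <tr>
--                         <td>Error % Threshold</td>
--                         <td>{form_data.get('err_rate_threshold', '')}</td>
--                     </tr>
--                     <tr>
--                         <td>Azure New Bugs IDs</td>
--                         <td>{form_data.get('new_bugs', '')}</td>
--                     </tr>
--                     <tr>
--                         <td>Azure Reopened Bugs IDs</td>
--                         <td>{form_data.get('reopened_bugs', '')}</td>
--                     </tr>
--                     <tr>
--                         <td>Azure Release Report</td>
--                         <td>{form_data.get('release_report', '')}</td>
--                     </tr>
--                     <tr>
--                         <td>Test Scope</td>
--                         <td>{'<br>'.join(line for line in form_data.get('scope', '').splitlines())}</td>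
--                     </tr>
--                 </table>
--     '''
-- ===== SOURCE B (Python) =====
-- ROWS = [
--     ("Performance Engineer Name", "engineer_name"),
--     ("URL Under Test", "url"),
--     ("Test Round", "test_round"),
--     ("Test Round Results", "round_status"),
--     ("Test Type", "test_type"),
--     ("Number of CUs", "cu"),
--     ("Ramp up in min", "ramp_up"),
--     ("Test Duration in min", "duration"),
--     ("Web Transactions Compliant?", "web_trans_status"),
--     ("API Transactions Compliant?", "api_trans_status"),
--     ("Error % Compliant?", "error_rate_status"),
--     ("API 90% Threshold (ms)", "api_threshold"),
--     ("Error % Threshold", "err_rate_threshold"),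
--     ("Azure New Bugs IDs", "new_bugs"),
--     ("Azure Reopened Bugs IDs", "reopened_bugs"),
--     ("Azure Release Report", "release_report"),
--     ("Test Scope", "scope"),
-- ]
--
-- HEADER = ('\n        <p class="dashboard-title">Test Report Detailed Results</p>\n'
--           '        </div>\n'
--           '        <div class="panel-body">\n'
--           '            <section id="apdex" class="col-md-12 table-responsive">\n'
--           '                <table id="apdexTable" class="table table-bordered table-condensed tablesorter ">\n'
--           '                    ')
--
-- FOOTER = '\n                </table>\n    '
--
--
-- def _row(label, value):
--     return ('<tr>\n'
--             '                        <td>' + label + '</td>\n'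
--             '                        <td>' + value + '</td>\n'
--             '                    </tr>')
--
--
-- def generate_custom_html(form_data):
--     """Generate the custom HTML table with test details"""
--     def value(key):
--         v = form_data.get(key, '')
--         return '<br>'.join(v.splitlines()) if key == 'scope' else v
--     body = '\n                    '.join(_row(label, value(key)) for label, key in ROWS)
--     return HEADER + body + FOOTER
-- ===== Notes on version B (the rewrite author's own statement) =====
-- stated objective: simpler
-- what changed: Replaces A's single giant f-string with a data-driven decomposition: a (label, key) row table, one shared row template and a join over the rows, with the scope row handled by a key test.
import Mathlib
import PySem

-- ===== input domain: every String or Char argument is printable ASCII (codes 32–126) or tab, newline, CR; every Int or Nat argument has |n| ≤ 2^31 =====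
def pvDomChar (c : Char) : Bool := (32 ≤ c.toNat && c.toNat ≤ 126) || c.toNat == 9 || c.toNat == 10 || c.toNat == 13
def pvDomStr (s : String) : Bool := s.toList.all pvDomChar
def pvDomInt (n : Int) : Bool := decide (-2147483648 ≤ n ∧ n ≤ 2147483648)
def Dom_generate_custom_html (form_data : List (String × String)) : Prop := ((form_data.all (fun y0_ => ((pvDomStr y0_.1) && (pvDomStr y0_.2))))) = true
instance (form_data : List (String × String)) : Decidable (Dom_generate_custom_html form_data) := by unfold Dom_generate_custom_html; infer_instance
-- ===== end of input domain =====

-- B replaces A's single giant f-string with a (label,key) row table, one row template and a join: simpler decomposition, identical output.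
-- ===== PORT A =====
def generate_custom_html (form_data : List (String × String)) : String :=
  "\n        <p class=\"dashboard-title\">Test Report Detailed Results</p>\n        </div>\n        <div class=\"panel-body\">\n            <section id=\"apdex\" class=\"col-md-12 table-responsive\">\n                <table id=\"apdexTable\" class=\"table table-bordered table-condensed tablesorter \">\n                    <tr>\n                        <td>Performance Engineer Name</td>\n                        <td>"
  ++ PySem.Dict.getD (PySem.Dict.mk form_data) "engineer_name" ""
  ++ "</td>\n                    </tr>\n                    <tr>\n                        <td>URL Under Test</td>\n                        <td>"
  ++ PySem.Dict.getD (PySem.Dict.mk form_data) "url" ""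
  ++ "</td>\n                    </tr>\n                    <tr>\n                        <td>Test Round</td>\n                        <td>"
  ++ PySem.Dict.getD (PySem.Dict.mk form_data) "test_round" ""
  ++ "</td>\n                    </tr>\n                    <tr>\n                        <td>Test Round Results</td>\n                        <td>"
  ++ PySem.Dict.getD (PySem.Dict.mk form_data) "round_status" ""
  ++ "</td>\n                    </tr>\n                    <tr>\n                        <td>Test Type</td>\n                        <td>"
  ++ PySem.Dict.getD (PySem.Dict.mk form_data) "test_type" ""
  ++ "</td>\n                    </tr>\n                    <tr>\n                        <td>Number of CUs</td>\n                        <td>"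
  ++ PySem.Dict.getD (PySem.Dict.mk form_data) "cu" ""
  ++ "</td>\n                    </tr>\n                    <tr>\n                        <td>Ramp up in min</td>\n                        <td>"
  ++ PySem.Dict.getD (PySem.Dict.mk form_data) "ramp_up" ""
  ++ "</td>\n                    </tr>\n                    <tr>\n                        <td>Test Duration in min</td>\n                        <td>"
  ++ PySem.Dict.getD (PySem.Dict.mk form_data) "duration" ""
  ++ "</td>\n                    </tr>\n                    <tr>\n                        <td>Web Transactions Compliant?</td>\n                        <td>"
  ++ PySem.Dict.getD (PySem.Dict.mk form_data) "web_trans_status" ""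
  ++ "</td>\n                    </tr>\n                    <tr>\n                        <td>API Transactions Compliant?</td>\n                        <td>"
  ++ PySem.Dict.getD (PySem.Dict.mk form_data) "api_trans_status" ""
  ++ "</td>\n                    </tr>\n                    <tr>\n                        <td>Error % Compliant?</td>\n                        <td>"
  ++ PySem.Dict.getD (PySem.Dict.mk form_data) "error_rate_status" ""
  ++ "</td>\n                    </tr>\n                    <tr>\n                        <td>API 90% Threshold (ms)</td>\n                        <td>"
  ++ PySem.Dict.getD (PySem.Dict.mk form_data) "api_threshold" ""
  ++ "</td>\n                    </tr>\n                    <tr>\n                        <td>Error % Threshold</td>\n                        <td>"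
  ++ PySem.Dict.getD (PySem.Dict.mk form_data) "err_rate_threshold" ""
  ++ "</td>\n                    </tr>\n                    <tr>\n                        <td>Azure New Bugs IDs</td>\n                        <td>"
  ++ PySem.Dict.getD (PySem.Dict.mk form_data) "new_bugs" ""
  ++ "</td>\n                    </tr>\n                    <tr>\n                        <td>Azure Reopened Bugs IDs</td>\n                        <td>"
  ++ PySem.Dict.getD (PySem.Dict.mk form_data) "reopened_bugs" ""
  ++ "</td>\n                    </tr>\n                    <tr>\n                        <td>Azure Release Report</td>\n                        <td>"
  ++ PySem.Dict.getD (PySem.Dict.mk form_data) "release_report" ""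
  ++ "</td>\n                    </tr>\n                    <tr>\n                        <td>Test Scope</td>\n                        <td>"
  ++ (PySem.Str.join "<br>" (PySem.Str.splitlines (PySem.Dict.getD (PySem.Dict.mk form_data) "scope" "")))
  ++ "</td>\n                    </tr>\n                </table>\n    "

-- ===== PORT B =====
def pvRows : List (String × String) := [
  ("Performance Engineer Name", "engineer_name"),
  ("URL Under Test", "url"),
  ("Test Round", "test_round"),
  ("Test Round Results", "round_status"),
  ("Test Type", "test_type"),
  ("Number of CUs", "cu"),
  ("Ramp up in min", "ramp_up"),
  ("Test Duration in min", "duration"),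
  ("Web Transactions Compliant?", "web_trans_status"),
  ("API Transactions Compliant?", "api_trans_status"),
  ("Error % Compliant?", "error_rate_status"),
  ("API 90% Threshold (ms)", "api_threshold"),
  ("Error % Threshold", "err_rate_threshold"),
  ("Azure New Bugs IDs", "new_bugs"),
  ("Azure Reopened Bugs IDs", "reopened_bugs"),
  ("Azure Release Report", "release_report"),
  ("Test Scope", "scope")]
def pvHeader : String := "\n        <p class=\"dashboard-title\">Test Report Detailed Results</p>\n        </div>\n        <div class=\"panel-body\">\n            <section id=\"apdex\" class=\"col-md-12 table-responsive\">\n                <table id=\"apdexTable\" class=\"table table-bordered table-condensed tablesorter \">\n                    "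
def pvFooter : String := "\n                </table>\n    "
def pvRow (label value : String) : String :=
  "<tr>\n                        <td>" ++ label ++ "</td>\n                        <td>" ++ value ++ "</td>\n                    </tr>"
def pvValue (form_data : List (String × String)) (key : String) : String :=
  let v := PySem.Dict.getD (PySem.Dict.mk form_data) key ""
  if key == "scope" then PySem.Str.join "<br>" (PySem.Str.splitlines v) else v
def generate_custom_html_alt (form_data : List (String × String)) : String :=
  pvHeader ++ PySem.Str.join "\n                    " (pvRows.map (fun r => pvRow r.1 (pvValue form_data r.2))) ++ pvFooter

-- ===== PRECONDITION & SPEC =====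
def Spec_generate_custom_html (form_data : List (String × String)) (out : String) : Prop := out = generate_custom_html_alt form_data
instance (form_data : List (String × String)) (out : String) : Decidable (Spec_generate_custom_html form_data out) := by unfold Spec_generate_custom_html; infer_instance

-- ===== CLAIM (what is proved, stated in full; the proofs are below) =====
def Claim_equal_generate_custom_html : Prop := ∀ (form_data : List (String × String)), Dom_generate_custom_html form_data → Spec_generate_custom_html form_data (generate_custom_html form_data)

-- ===== LEMMAS AND PROOFS =====
theorem pvJoin_single (sep a : String) : PySem.Str.join sep [a] = a := by
  rw [← String.toList_inj]; simp [PySem.Str.join, PySem.Chars.join, List.intercalate]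

theorem pvJoin_cons_cons (sep a b : String) (l : List String) :
    PySem.Str.join sep (a :: b :: l) = a ++ sep ++ PySem.Str.join sep (b :: l) := by
  rw [← String.toList_inj]
  simp [PySem.Str.join, PySem.Chars.join, List.intercalate]

-- ===== VERDICT (by name: the statement is the Claim_ definition above) =====
set_option maxRecDepth 30000 in
theorem generate_custom_html_spec : Claim_equal_generate_custom_html := by
  intro fd _
  unfold Spec_generate_custom_html generate_custom_html generate_custom_html_alt pvHeader pvFooter pvRows pvRow pvValue
  simp only [List.map_cons, List.map_nil, pvJoin_cons_cons, pvJoin_single, String.reduceBEq,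
    Bool.false_eq_true, if_false, if_true]
  rw [show ("
        <p class=\"dashboard-title\">Test Report Detailed Results</p>
        </div>
        <div class=\"panel-body\">
            <section id=\"apdex\" class=\"col-md-12 table-responsive\">
                <table id=\"apdexTable\" class=\"table table-bordered table-condensed tablesorter \">
                    <tr>
                        <td>Performance Engineer Name</td>
                        <td>":String) = "
        <p class=\"dashboard-title\">Test Report Detailed Results</p>
        </div>
        <div class=\"panel-body\">
            <section id=\"apdex\" class=\"col-md-12 table-responsive\">
                <table id=\"apdexTable\" class=\"table table-bordered table-condensed tablesorter \">
                    " ++ "<tr>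
                        <td>" ++ "Performance Engineer Name" ++ "</td>
                        <td>" from by decide,
    show ("</td>
                    </tr>
                    <tr>
                        <td>URL Under Test</td>
                        <td>":String) = "</td>
                    </tr>" ++ "
                    " ++ "<tr>
                        <td>" ++ "URL Under Test" ++ "</td>
                        <td>" from by decide,
    show ("</td>
                    </tr>
                    <tr>
                        <td>Test Round</td>
                        <td>":String) = "</td>
                    </tr>" ++ "
                    " ++ "<tr>
                        <td>" ++ "Test Round" ++ "</td>
                        <td>" from by decide,
    show ("</td>
                    </tr>
                    <tr>
                        <td>Test Round Results</td>
                        <td>":String) = "</td>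
                    </tr>" ++ "
                    " ++ "<tr>
                        <td>" ++ "Test Round Results" ++ "</td>
                        <td>" from by decide,
    show ("</td>
                    </tr>
                    <tr>
                        <td>Test Type</td>
                        <td>":String) = "</td>
                    </tr>" ++ "
                    " ++ "<tr>
                        <td>" ++ "Test Type" ++ "</td>
                        <td>" from by decide,
    show ("</td>
                    </tr>
                    <tr>
                        <td>Number of CUs</td>
                        <td>":String) = "</td>
                    </tr>" ++ "
                    " ++ "<tr>
                        <td>" ++ "Number of CUs" ++ "</td>
                        <td>" from by decide,
    show ("</td>
                    </tr>
                    <tr>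
                        <td>Ramp up in min</td>
                        <td>":String) = "</td>
                    </tr>" ++ "
                    " ++ "<tr>
                        <td>" ++ "Ramp up in min" ++ "</td>
                        <td>" from by decide,
    show ("</td>
                    </tr>
                    <tr>
                        <td>Test Duration in min</td>
                        <td>":String) = "</td>
                    </tr>" ++ "
                    " ++ "<tr>
                        <td>" ++ "Test Duration in min" ++ "</td>
                        <td>" from by decide,
    show ("</td>
                    </tr>
                    <tr>
                        <td>Web Transactions Compliant?</td>
                        <td>":String) = "</td>
                    </tr>" ++ "
                    " ++ "<tr>
                        <td>" ++ "Web Transactions Compliant?" ++ "</td>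
                        <td>" from by decide,
    show ("</td>
                    </tr>
                    <tr>
                        <td>API Transactions Compliant?</td>
                        <td>":String) = "</td>
                    </tr>" ++ "
                    " ++ "<tr>
                        <td>" ++ "API Transactions Compliant?" ++ "</td>
                        <td>" from by decide,
    show ("</td>
                    </tr>
                    <tr>
                        <td>Error % Compliant?</td>
                        <td>":String) = "</td>
                    </tr>" ++ "
                    " ++ "<tr>
                        <td>" ++ "Error % Compliant?" ++ "</td>
                        <td>" from by decide,
    show ("</td>
                    </tr>
                    <tr>
                        <td>API 90% Threshold (ms)</td>
                        <td>":String) = "</td>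
                    </tr>" ++ "
                    " ++ "<tr>
                        <td>" ++ "API 90% Threshold (ms)" ++ "</td>
                        <td>" from by decide,
    show ("</td>
                    </tr>
                    <tr>
                        <td>Error % Threshold</td>
                        <td>":String) = "</td>
                    </tr>" ++ "
                    " ++ "<tr>
                        <td>" ++ "Error % Threshold" ++ "</td>
                        <td>" from by decide,
    show ("</td>
                    </tr>
                    <tr>
                        <td>Azure New Bugs IDs</td>
                        <td>":String) = "</td>
                    </tr>" ++ "
                    " ++ "<tr>
                        <td>" ++ "Azure New Bugs IDs" ++ "</td>
                        <td>" from by decide,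
    show ("</td>
                    </tr>
                    <tr>
                        <td>Azure Reopened Bugs IDs</td>
                        <td>":String) = "</td>
                    </tr>" ++ "
                    " ++ "<tr>
                        <td>" ++ "Azure Reopened Bugs IDs" ++ "</td>
                        <td>" from by decide,
    show ("</td>
                    </tr>
                    <tr>
                        <td>Azure Release Report</td>
                        <td>":String) = "</td>
                    </tr>" ++ "
                    " ++ "<tr>
                        <td>" ++ "Azure Release Report" ++ "</td>
                        <td>" from by decide,
    show ("</td>
                    </tr>
                    <tr>
                        <td>Test Scope</td>
                        <td>":String) = "</td>
                    </tr>" ++ "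
                    " ++ "<tr>
                        <td>" ++ "Test Scope" ++ "</td>
                        <td>" from by decide,
    show ("</td>
                    </tr>
                </table>
    ":String) = "</td>
                    </tr>" ++ "
                </table>
    " from by decide]
  simp only [String.append_assoc]
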